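-- pv_equiv track=rewrite | github.com/NobuyukiInoue/LeetCode | Problems/2500_2599/2553_Separate_the_Digits_in_an_Array/Project_Python3/Separate_the_Digits_in_an_Array.py | separateDigits2
-- ===== SOURCE A (Python) =====
-- from typing import List, Dict, Tuple
--
-- def separateDigits2(nums: List[int]) -> List[int]:
--     # 72ms - 77ms
--     ans = []
--     for num in nums:
--         if num >= 10:
--             temp = []
--             while num > 0:
--                 temp.append(num % 10)
--                 num //= 10
--             for i in range(len(temp) - 1, -1, -1):
--                 ans.append(temp[i])
--         else:
--             ans.append(num)
--     return ans
-- ===== SOURCE B (Python) =====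
-- def separateDigits2(nums):
--     def digits(n):
--         # most-significant-first by recursion; any n < 10 (negatives included) stays whole
--         return [n] if n < 10 else digits(n // 10) + [n % 10]
--     return [d for n in nums for d in digits(n)]
-- ===== Notes on version B (the rewrite author's own statement) =====
-- stated objective: simpler
-- what changed: Replace the while-loop lsd-first extraction into a temp list plus an index-reversal re-append pass with a recursive msd-first digit function flattened by a single comprehension; no temp list and no reversal.
import Mathlib
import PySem

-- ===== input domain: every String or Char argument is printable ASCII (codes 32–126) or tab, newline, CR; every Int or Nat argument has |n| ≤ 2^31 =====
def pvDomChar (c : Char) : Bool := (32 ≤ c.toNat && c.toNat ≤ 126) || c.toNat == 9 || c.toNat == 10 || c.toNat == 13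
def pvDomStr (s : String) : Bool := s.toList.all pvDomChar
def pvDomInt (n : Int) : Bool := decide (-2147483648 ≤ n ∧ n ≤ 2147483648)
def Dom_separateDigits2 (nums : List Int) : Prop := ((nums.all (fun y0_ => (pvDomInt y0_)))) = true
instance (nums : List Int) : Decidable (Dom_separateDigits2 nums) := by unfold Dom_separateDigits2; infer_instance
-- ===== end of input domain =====

-- B is a simpler decomposition: a recursive msd-first digit helper flattened by one pass,
-- replacing A's lsd-first while-loop into a temp list plus an index-reversal re-append.
-- ===== PORT A =====
-- the `while num > 0: temp.append(num % 10); num //= 10` loop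
def pvWhileA (n : Int) (temp : List Int) : List Int :=
  if 0 < n then
    pvWhileA (PySem.Int.floordiv n 10) (temp ++ [PySem.Int.mod n 10])
  else temp
termination_by n.toNat
decreasing_by
  rename_i h
  rw [PySem.Int.floordiv_eq_ediv_of_pos (by omega : (0:Int) < 10)]
  omega

def separateDigits2 (nums : List Int) : List Int :=
  nums.foldl (fun ans num =>
    if num ≥ 10 then
      let temp := pvWhileA num []
      (PySem.List.pyRange ((temp.length : Int) - 1) (-1) (-1)).foldl
        (fun acc i => acc ++ [PySem.List.pyGetD temp i 0]) ans
    else ans ++ [num]) []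

-- ===== PORT B =====
def pvDigitsB (n : Int) : List Int :=
  if n < 10 then [n]
  else pvDigitsB (PySem.Int.floordiv n 10) ++ [PySem.Int.mod n 10]
termination_by n.toNat
decreasing_by
  rename_i h
  rw [PySem.Int.floordiv_eq_ediv_of_pos (by omega : (0:Int) < 10)]
  omega

def separateDigits2_alt (nums : List Int) : List Int :=
  nums.flatMap pvDigitsB

-- ===== PRECONDITION & SPEC =====
def Spec_separateDigits2 (nums : List Int) (out : List Int) : Prop := out = separateDigits2_alt nums
instance (nums : List Int) (out : List Int) : Decidable (Spec_separateDigits2 nums out) := by unfold Spec_separateDigits2; infer_instance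

-- ===== CLAIM (what is proved, stated in full; the proofs are below) =====
def Claim_equal_separateDigits2 : Prop := ∀ (nums : List Int), Dom_separateDigits2 nums → Spec_separateDigits2 nums (separateDigits2 nums)

-- ===== LEMMAS AND PROOFS =====

lemma pvWhileA_append (n : Int) (temp : List Int) :
    pvWhileA n temp = temp ++ pvWhileA n [] := by
  generalize hk : n.toNat = k
  induction k using Nat.strong_induction_on generalizing n temp with
  | _ k ih =>
    by_cases h : 0 < n
    · conv_lhs => rw [pvWhileA, if_pos h]
      conv_rhs => rw [pvWhileA, if_pos h]
      have hd : (PySem.Int.floordiv n 10).toNat < k := by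
        rw [PySem.Int.floordiv_eq_ediv_of_pos (by omega : (0:Int) < 10)]; omega
      rw [ih _ hd _ _ rfl, ih _ hd _ ([] ++ [PySem.Int.mod n 10]) rfl]
      simp
    · rw [pvWhileA, if_neg h, pvWhileA, if_neg h]; simp

lemma digitsB_eq_reverse_whileA (n : Int) (hn : 0 < n) :
    pvDigitsB n = (pvWhileA n []).reverse := by
  induction n using pvDigitsB.induct with
  | case1 n h =>
    rw [pvDigitsB, if_pos h, pvWhileA, if_pos hn,
        pvWhileA_append, pvWhileA]
    have h0 : PySem.Int.floordiv n 10 = 0 := by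
      rw [PySem.Int.floordiv_eq_ediv_of_pos (by omega : (0:Int) < 10)]; omega
    have hm : PySem.Int.mod n 10 = n := by
      rw [PySem.Int.mod_eq_emod_of_pos (by omega : (0:Int) < 10)]; omega
    rw [h0]
    rw [pvWhileA, if_neg (by omega)]
    simp
    omega
  | case2 n h ih =>
    have hq : 0 < PySem.Int.floordiv n 10 := by
      rw [PySem.Int.floordiv_eq_ediv_of_pos (by omega : (0:Int) < 10)]; omega
    rw [pvDigitsB, if_neg h, pvWhileA, if_pos hn, pvWhileA_append, ih hq]
    simp

lemma foldl_append_map {α β : Type} (f : α → β) (l : List α) (acc : List β) :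
    l.foldl (fun acc i => acc ++ [f i]) acc = acc ++ l.map f := by
  induction l generalizing acc with
  | nil => simp
  | cons x xs ih => simp [List.foldl, ih]

-- the `for i in range(len(temp)-1, -1, -1): ans.append(temp[i])` pass appends temp reversed
lemma reversal_pass (temp ans : List Int) :
    (PySem.List.pyRange ((temp.length : Int) - 1) (-1) (-1)).foldl
      (fun acc i => acc ++ [PySem.List.pyGetD temp i 0]) ans = ans ++ temp.reverse := by
  have e : PySem.List.pyRange ((temp.length : Int) - 1) (-1) (-1)
      = (PySem.List.pyRange 0 (temp.length : Int) 1).reverse := by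
    rw [PySem.List.pyRange_neg_one_eq_reverse]; norm_num
  rw [e, foldl_append_map]
  congr 1
  rw [List.map_reverse]
  congr 1
  simpa using PySem.List.map_pyGetD_pyRange_zero' (xs := temp) (d := (0:Int))

lemma foldA_eq (nums : List Int) (ans : List Int) :
    nums.foldl (fun ans num =>
      if num ≥ 10 then
        let temp := pvWhileA num []
        (PySem.List.pyRange ((temp.length : Int) - 1) (-1) (-1)).foldl
          (fun acc i => acc ++ [PySem.List.pyGetD temp i 0]) ans
      else ans ++ [num]) ans = ans ++ nums.flatMap pvDigitsB := by
  induction nums generalizing ans with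
  | nil => simp
  | cons num rest ih =>
    simp only [List.foldl, List.flatMap_cons]
    by_cases h : num ≥ 10
    · rw [if_pos h, ih, reversal_pass, ← digitsB_eq_reverse_whileA num (by omega)]
      simp
    · rw [if_neg h, ih]
      have : pvDigitsB num = [num] := by rw [pvDigitsB, if_pos (by omega)]
      simp [this]

-- ===== VERDICT (by name: the statement is the Claim_ definition above) =====
theorem separateDigits2_spec : Claim_equal_separateDigits2 := by
  intro nums _
  show separateDigits2 nums = separateDigits2_alt nums
  unfold separateDigits2 separateDigits2_alt
  simpa using foldA_eq nums []
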